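-- pv_equiv track=rewrite | github.com/yapit-tts/yapit | scripts/seed_perf_fixtures.py | generate_sectioned
-- ===== SOURCE A (Python) =====
-- SENTENCES = [
--     "The quick brown fox jumps over the lazy dog near the riverbank.",
--     "Advances in machine learning have transformed how we approach complex optimization problems across many domains.",
--     "She opened the door to find an empty room, save for a single chair facing the window.",
--     "The committee reviewed the proposal and determined that further analysis would be required before proceeding.",
--     "Rain fell steadily through the afternoon, pooling in the gutters and running in thin streams down the hill.",
--     "According to recent studies, the correlation between sleep quality and cognitive performance is stronger than previously thought.",
--     "He picked up the phone, hesitated, then set it back down on the counter without dialing.",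
--     "The architecture of distributed systems requires careful consideration of failure modes, network partitions, and data consistency.",
--     "Sunlight filtered through the canopy, casting dappled shadows across the forest floor where mushrooms grew in clusters.",
--     "The fundamental theorem establishes that every continuous function on a closed interval attains its maximum and minimum values.",
-- ]
--
-- def _paragraph(block_idx: int, max_chars: int = 0) -> str:
--     """Generate a paragraph, optionally truncated to fit within content limits."""
--     s1 = SENTENCES[block_idx % len(SENTENCES)]
--     s2 = SENTENCES[(block_idx * 3 + 1) % len(SENTENCES)]
--     full = f"{s1} {s2}"
--     if max_chars > 0 and len(full) > max_chars:
--         return full[:max_chars]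
--     return full
--
-- MAX_CONTENT_CHARS = 490_000  # API limit is 500k, leave headroom
--
-- SEPARATOR_CHARS = 2  # "\n\n" between paragraphs
--
-- def _chars_per_paragraph(n_blocks: int, heading_overhead: int = 0) -> int:
--     """Max chars per paragraph to stay under API limit. 0 = no limit."""
--     available = MAX_CONTENT_CHARS - heading_overhead - n_blocks * SEPARATOR_CHARS
--     budget = available // max(n_blocks, 1)
--     # No need to truncate if budget exceeds typical paragraph length
--     return 0 if budget >= 220 else max(20, budget)
--
-- def generate_sectioned(n_blocks: int) -> str:
--     """H1 heading every ~20 blocks. Tests section-aware code paths."""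
--     section_interval = 20
--     n_headings = n_blocks // section_interval + 1
--     max_chars = _chars_per_paragraph(n_blocks, heading_overhead=n_headings * 20)
--     parts: list[str] = []
--     section_num = 0
--     for i in range(n_blocks):
--         if i % section_interval == 0:
--             section_num += 1
--             parts.append(f"# Section {section_num}")
--         parts.append(_paragraph(i, max_chars))
--     return "\n\n".join(parts)
-- ===== SOURCE B (Python) =====
-- SENTENCES = [
--     "The quick brown fox jumps over the lazy dog near the riverbank.",
--     "Advances in machine learning have transformed how we approach complex optimization problems across many domains.",
--     "She opened the door to find an empty room, save for a single chair facing the window.",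
--     "The committee reviewed the proposal and determined that further analysis would be required before proceeding.",
--     "Rain fell steadily through the afternoon, pooling in the gutters and running in thin streams down the hill.",
--     "According to recent studies, the correlation between sleep quality and cognitive performance is stronger than previously thought.",
--     "He picked up the phone, hesitated, then set it back down on the counter without dialing.",
--     "The architecture of distributed systems requires careful consideration of failure modes, network partitions, and data consistency.",
--     "Sunlight filtered through the canopy, casting dappled shadows across the forest floor where mushrooms grew in clusters.",
--     "The fundamental theorem establishes that every continuous function on a closed interval attains its maximum and minimum values.",
-- ]
--
-- def _paragraph(block_idx: int, max_chars: int = 0) -> str: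
--     s1 = SENTENCES[block_idx % len(SENTENCES)]
--     s2 = SENTENCES[(block_idx * 3 + 1) % len(SENTENCES)]
--     full = f"{s1} {s2}"
--     if max_chars > 0 and len(full) > max_chars:
--         return full[:max_chars]
--     return full
--
-- MAX_CONTENT_CHARS = 490_000
--
-- SEPARATOR_CHARS = 2
--
-- def _chars_per_paragraph(n_blocks: int, heading_overhead: int = 0) -> int:
--     available = MAX_CONTENT_CHARS - heading_overhead - n_blocks * SEPARATOR_CHARS
--     budget = available // max(n_blocks, 1)
--     return 0 if budget >= 220 else max(20, budget)
--
-- def generate_sectioned(n_blocks: int) -> str: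
--     """Same text as a staged pipeline: materialize the paragraph list once, slice it
--     into 20-block chunks, render each chunk as its own headed section string, and
--     join the section strings -- no per-item heading test or section counter."""
--     section_interval = 20
--     max_chars = _chars_per_paragraph(n_blocks, heading_overhead=(n_blocks // section_interval + 1) * 20)
--     paragraphs = [_paragraph(i, max_chars) for i in range(n_blocks)]
--     n_sections = -(-n_blocks // section_interval)  # ceil; 0 for n_blocks <= 0
--     sections = [
--         "\n\n".join([f"# Section {k + 1}"] + paragraphs[k * section_interval:(k + 1) * section_interval])
--         for k in range(n_sections)
--     ]
--     return "\n\n".join(sections)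
-- ===== Notes on version B (the rewrite author's own statement) =====
-- stated objective: alternative
-- what changed: Replaces A's single pass with a per-item modulo heading test and mutable section counter by a staged pipeline: materialize the list of all paragraphs once, slice it into 20-block chunks, render each chunk as one headed section string via a join, and join the section strings.
import Mathlib
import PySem

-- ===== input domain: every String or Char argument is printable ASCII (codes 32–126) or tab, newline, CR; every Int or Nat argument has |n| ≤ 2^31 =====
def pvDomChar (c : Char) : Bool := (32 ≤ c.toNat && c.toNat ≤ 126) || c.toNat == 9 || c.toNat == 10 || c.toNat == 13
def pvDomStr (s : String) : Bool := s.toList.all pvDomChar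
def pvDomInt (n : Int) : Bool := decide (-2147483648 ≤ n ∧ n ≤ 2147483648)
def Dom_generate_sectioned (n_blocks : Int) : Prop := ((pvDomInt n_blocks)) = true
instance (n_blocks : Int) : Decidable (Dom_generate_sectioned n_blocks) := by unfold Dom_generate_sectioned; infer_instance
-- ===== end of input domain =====

-- B builds the same text as a staged pipeline (materialize the paragraph list, slice it into
-- 20-block chunks, render each chunk as one headed section string, join the section strings)
-- instead of A's single pass with a modulo heading test; objective: alternative, same cost.

-- ===== PORT A =====
-- module constant SENTENCES
def SENTENCES : List String := [
  "The quick brown fox jumps over the lazy dog near the riverbank.",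
  "Advances in machine learning have transformed how we approach complex optimization problems across many domains.",
  "She opened the door to find an empty room, save for a single chair facing the window.",
  "The committee reviewed the proposal and determined that further analysis would be required before proceeding.",
  "Rain fell steadily through the afternoon, pooling in the gutters and running in thin streams down the hill.",
  "According to recent studies, the correlation between sleep quality and cognitive performance is stronger than previously thought.",
  "He picked up the phone, hesitated, then set it back down on the counter without dialing.",
  "The architecture of distributed systems requires careful consideration of failure modes, network partitions, and data consistency.",
  "Sunlight filtered through the canopy, casting dappled shadows across the forest floor where mushrooms grew in clusters.",
  "The fundamental theorem establishes that every continuous function on a closed interval attains its maximum and minimum values."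
]

-- module helper _paragraph (shared by both Pythons). The list indexes are taken modulo
-- len(SENTENCES) = 10, hence always in range: the `.getD ""` default is unreachable.
def paragraph (block_idx : Int) (max_chars : Int) : String :=
  let s1 := (PySem.List.pyGet? SENTENCES (PySem.Int.mod block_idx (PySem.List.len SENTENCES))).getD ""
  let s2 := (PySem.List.pyGet? SENTENCES (PySem.Int.mod (block_idx * 3 + 1) (PySem.List.len SENTENCES))).getD ""
  let full := s1 ++ " " ++ s2
  if max_chars > 0 ∧ PySem.Str.len full > max_chars then
    PySem.Str.slice full none (some max_chars)
  else full

def MAX_CONTENT_CHARS : Int := 490000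

def SEPARATOR_CHARS : Int := 2

-- module helper _chars_per_paragraph (shared by both Pythons)
def chars_per_paragraph (n_blocks : Int) (heading_overhead : Int) : Int :=
  let available := MAX_CONTENT_CHARS - heading_overhead - n_blocks * SEPARATOR_CHARS
  let budget := PySem.Int.floordiv available (max n_blocks 1)
  if budget ≥ 220 then 0 else max 20 budget

def generate_sectioned (n_blocks : Int) : String :=
  let section_interval : Int := 20
  let n_headings := PySem.Int.floordiv n_blocks section_interval + 1
  let max_chars := chars_per_paragraph n_blocks (n_headings * 20)
  let st := (PySem.List.pyRange 0 n_blocks 1).foldl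
    (fun (st : Int × List String) i =>
      if PySem.Int.mod i section_interval = 0 then
        (st.1 + 1, st.2 ++ ["# Section " ++ PySem.Int.toStr (st.1 + 1), paragraph i max_chars])
      else
        (st.1, st.2 ++ [paragraph i max_chars]))
    ((0 : Int), ([] : List String))
  PySem.Str.join "\n\n" st.2

-- ===== PORT B =====
def generate_sectioned_alt (n_blocks : Int) : String :=
  let section_interval : Int := 20
  let max_chars := chars_per_paragraph n_blocks ((PySem.Int.floordiv n_blocks section_interval + 1) * 20)
  let paragraphs := (PySem.List.pyRange 0 n_blocks 1).map (fun i => paragraph i max_chars)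
  let n_sections := -(PySem.Int.floordiv (-n_blocks) section_interval)
  let sections := (PySem.List.pyRange 0 n_sections 1).map (fun k =>
    PySem.Str.join "\n\n" (("# Section " ++ PySem.Int.toStr (k + 1)) ::
      PySem.List.slice paragraphs (some (k * section_interval)) (some ((k + 1) * section_interval))))
  PySem.Str.join "\n\n" sections

-- ===== PRECONDITION & SPEC =====
def Spec_generate_sectioned (n_blocks : Int) (out : String) : Prop := out = generate_sectioned_alt n_blocks
instance (n_blocks : Int) (out : String) : Decidable (Spec_generate_sectioned n_blocks out) := by unfold Spec_generate_sectioned; infer_instance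

-- ===== CLAIM (what is proved, stated in full; the proofs are below) =====
def Claim_equal_generate_sectioned : Prop := ∀ (n_blocks : Int), Dom_generate_sectioned n_blocks → Spec_generate_sectioned n_blocks (generate_sectioned n_blocks)

-- ===== LEMMAS AND PROOFS =====

-- the k-th section of the output: a heading followed by that section's paragraphs
def pvSec (mc : Int) (N k : ℕ) : List String :=
  ("# Section " ++ PySem.Int.toStr ((k : Int) + 1)) ::
    (List.range (min 20 (N - 20 * k))).map (fun j : ℕ => paragraph ((k : Int) * 20 + (j : Int)) mc)

-- A's state after the first N blocks: section counter = ⌈N/20⌉, parts = the sections laid out flat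
lemma pvA_fold (mc : Int) (N : ℕ) :
    (List.range N).foldl
      (fun (st : Int × List String) (i : ℕ) =>
        if i % 20 = 0 then
          (st.1 + 1, st.2 ++ ["# Section " ++ PySem.Int.toStr (st.1 + 1), paragraph (i : Int) mc])
        else
          (st.1, st.2 ++ [paragraph (i : Int) mc]))
      ((0 : Int), ([] : List String))
    = ((((N + 19) / 20 : ℕ) : Int), (List.range ((N + 19) / 20)).flatMap (pvSec mc N)) := by
  induction N with
  | zero => simp
  | succ N ih =>
    rw [List.range_succ, List.foldl_append, ih]
    simp only [List.foldl_cons, List.foldl_nil]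
    by_cases h : N % 20 = 0
    · rw [if_pos h]
      have h1 : (N + 19) / 20 = N / 20 := by omega
      have h2 : (N + 1 + 19) / 20 = N / 20 + 1 := by omega
      have h3 : ∀ k ∈ List.range (N / 20), pvSec mc (N + 1) k = pvSec mc N k := by
        intro k hk
        rw [List.mem_range] at hk
        unfold pvSec
        have hm : min 20 (N + 1 - 20 * k) = min 20 (N - 20 * k) := by omega
        rw [hm]
      have h4 : (List.range (N / 20)).flatMap (pvSec mc (N + 1))
          = (List.range (N / 20)).flatMap (pvSec mc N) := by
        rw [List.flatMap_def, List.flatMap_def, List.map_congr_left h3]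
      have h5 : pvSec mc (N + 1) (N / 20)
          = ["# Section " ++ PySem.Int.toStr ((N / 20 : ℕ) + 1), paragraph (N : Int) mc] := by
        have hm : min 20 (N + 1 - 20 * (N / 20)) = 1 := by omega
        have hN : ((N / 20 : ℕ) : Int) * 20 + ((0 : ℕ) : Int) = (N : Int) := by push_cast; omega
        simp only [pvSec, hm, List.range_one, List.map_cons, List.map_nil, hN]
      rw [h1, h2, List.range_succ, List.flatMap_append, h4]
      simp only [List.flatMap_cons, List.flatMap_nil, List.append_nil]
      rw [h5, Prod.mk.injEq]
      constructor
      · push_cast; ring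
      · rfl
    · rw [if_neg h]
      have h1 : (N + 19) / 20 = N / 20 + 1 := by omega
      have h2 : (N + 1 + 19) / 20 = N / 20 + 1 := by omega
      have h3 : ∀ k ∈ List.range (N / 20), pvSec mc (N + 1) k = pvSec mc N k := by
        intro k hk
        rw [List.mem_range] at hk
        unfold pvSec
        have hm : min 20 (N + 1 - 20 * k) = min 20 (N - 20 * k) := by omega
        rw [hm]
      have h4 : (List.range (N / 20)).flatMap (pvSec mc (N + 1))
          = (List.range (N / 20)).flatMap (pvSec mc N) := by
        rw [List.flatMap_def, List.flatMap_def, List.map_congr_left h3]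
      have h5 : pvSec mc (N + 1) (N / 20) = pvSec mc N (N / 20) ++ [paragraph (N : Int) mc] := by
        have hm1 : min 20 (N + 1 - 20 * (N / 20)) = N % 20 + 1 := by omega
        have hm2 : min 20 (N - 20 * (N / 20)) = N % 20 := by omega
        have hN : ((N / 20 : ℕ) : Int) * 20 + ((N % 20 : ℕ) : Int) = (N : Int) := by push_cast; omega
        simp only [pvSec, hm1, hm2, List.range_succ, List.map_append, List.map_cons, List.map_nil,
          hN, List.cons_append]
      rw [h1, h2, List.range_succ, List.flatMap_append, List.flatMap_append]
      simp only [List.flatMap_cons, List.flatMap_nil, List.append_nil]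
      rw [h4, h5, Prod.mk.injEq]
      constructor
      · rfl
      · simp [List.append_assoc]

-- the parts list A builds
lemma pvA_parts (mc : Int) (N : ℕ) :
    ((PySem.List.pyRange 0 (N : Int) 1).foldl
      (fun (st : Int × List String) i =>
        if PySem.Int.mod i 20 = 0 then
          (st.1 + 1, st.2 ++ ["# Section " ++ PySem.Int.toStr (st.1 + 1), paragraph i mc])
        else
          (st.1, st.2 ++ [paragraph i mc]))
      ((0 : Int), ([] : List String))).2
    = (List.range ((N + 19) / 20)).flatMap (pvSec mc N) := by
  rw [PySem.List.pyRange_one]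
  simp only [sub_zero, Int.toNat_natCast, List.foldl_map]
  rw [PySem.List.foldl_congr_mem (List.range N) _
    (fun (st : Int × List String) (i : ℕ) =>
      if i % 20 = 0 then
        (st.1 + 1, st.2 ++ ["# Section " ++ PySem.Int.toStr (st.1 + 1), paragraph (i : Int) mc])
      else
        (st.1, st.2 ++ [paragraph (i : Int) mc]))
    ((0 : Int), ([] : List String))
    (by
      intro acc i _
      have hc : PySem.Int.mod ((0 : Int) + (i : Int)) 20 = 0 ↔ i % 20 = 0 := by
        rw [PySem.Int.mod_eq_emod_of_pos (by norm_num)]; omega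
      dsimp only
      by_cases h : i % 20 = 0
      · rw [if_pos (hc.mpr h), if_pos h]; simp
      · rw [if_neg (fun hh => h (hc.mp hh)), if_neg h]; simp)]
  rw [pvA_fold]

-- join over an append of two nonempty lists splits around one separator
lemma pvJoin_append (sep : List Char) (a b : List (List Char)) (ha : a ≠ []) (hb : b ≠ []) :
    PySem.Chars.join sep (a ++ b) = PySem.Chars.join sep a ++ sep ++ PySem.Chars.join sep b := by
  induction a with
  | nil => exact absurd rfl ha
  | cons x t ih =>
    cases t with
    | nil =>
      cases b with
      | nil => exact absurd rfl hb
      | cons y u =>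
        rw [List.singleton_append, PySem.Chars.join_cons_cons, PySem.Chars.join_singleton]
    | cons x2 t2 =>
      have h1 : (x :: x2 :: t2) ++ b = x :: ((x2 :: t2) ++ b) := rfl
      have h2 : (x2 :: t2) ++ b = x2 :: (t2 ++ b) := rfl
      rw [h1, h2, PySem.Chars.join_cons_cons sep x x2 (t2 ++ b), ← h2, ih (by simp),
        PySem.Chars.join_cons_cons]
      simp [List.append_assoc]

-- joining the flattened sections = joining the per-section joins (each section nonempty)
lemma pvJoin_flatMap (sep : List Char) (l : List ℕ) (f : ℕ → List (List Char))
    (hf : ∀ k ∈ l, f k ≠ []) :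
    PySem.Chars.join sep (l.flatMap f)
      = PySem.Chars.join sep (l.map (fun k => PySem.Chars.join sep (f k))) := by
  induction l with
  | nil => simp
  | cons k t ih =>
    rw [List.flatMap_cons, List.map_cons]
    cases t with
    | nil => simp [PySem.Chars.join_singleton]
    | cons k2 t2 =>
      have hfk : f k ≠ [] := hf k (by simp)
      have hrest : (k2 :: t2).flatMap f ≠ [] := by
        have : f k2 ≠ [] := hf k2 (by simp)
        simp only [List.flatMap_cons, ne_eq, List.append_eq_nil_iff, not_and]
        intro h; exact absurd h this
      rw [pvJoin_append sep _ _ hfk hrest, ih (fun x hx => hf x (by simp [hx]))]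
      have hmap : (k2 :: t2).map (fun k => PySem.Chars.join sep (f k))
          = PySem.Chars.join sep (f k2) :: t2.map (fun k => PySem.Chars.join sep (f k)) := rfl
      rw [hmap, PySem.Chars.join_cons_cons]

-- the sections list B builds is the per-section render of pvSec
lemma pvB_sections (mc : Int) (N : ℕ) :
    (PySem.List.pyRange 0 (-(PySem.Int.floordiv (-(N : Int)) 20)) 1).map
      (fun k =>
        PySem.Str.join "\n\n" (("# Section " ++ PySem.Int.toStr (k + 1)) ::
          PySem.List.slice ((PySem.List.pyRange 0 (N : Int) 1).map (fun i => paragraph i mc))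
            (some (k * 20)) (some ((k + 1) * 20))))
    = (List.range ((N + 19) / 20)).map (fun k => PySem.Str.join "\n\n" (pvSec mc N k)) := by
  have hS : -(PySem.Int.floordiv (-(N : Int)) 20) = (((N + 19) / 20 : ℕ) : Int) := by
    rw [PySem.Int.floordiv_eq_ediv_of_pos (by norm_num)]; omega
  rw [hS, PySem.List.pyRange_one, PySem.List.pyRange_one]
  simp only [sub_zero, Int.toNat_natCast, List.map_map, Function.comp_def, zero_add]
  apply List.map_congr_left
  intro k hk
  rw [List.mem_range] at hk
  have ha : ((k : ℕ) : Int) * 20 = ((20 * k : ℕ) : Int) := by push_cast; ring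
  have hb : (((k : ℕ) : Int) + 1) * 20 = ((20 * k + 20 : ℕ) : Int) := by push_cast; ring
  rw [ha, hb, PySem.List.slice_natCast]
  unfold pvSec
  have h20 : 20 * k + 20 - 20 * k = 20 := by omega
  rw [h20]
  refine congrArg (PySem.Str.join "\n\n") (congrArg₂ List.cons rfl ?_)
  apply List.ext_getElem
  · simp only [List.length_take, List.length_drop, List.length_map, List.length_range]
  · intro i h1 h2
    simp only [List.getElem_take, List.getElem_drop, List.getElem_map, List.getElem_range]
    congr 1
    push_cast
    ring

-- flat parts joined = per-section joins joined (specialization of pvJoin_flatMap to pvSec)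
lemma pvJoin_final (mc : Int) (N S : ℕ) :
    PySem.Str.join "\n\n" ((List.range S).flatMap (pvSec mc N))
      = PySem.Str.join "\n\n" ((List.range S).map (fun k => PySem.Str.join "\n\n" (pvSec mc N k))) := by
  apply String.toList_injective
  rw [PySem.Str.toList_join, PySem.Str.toList_join, List.map_map, List.map_flatMap]
  rw [pvJoin_flatMap _ _ _ (by intro k _; simp [pvSec])]
  apply congrArg
  apply List.map_congr_left
  intro k _
  simp only [Function.comp_def, PySem.Str.toList_join]

-- ===== VERDICT (by name: the statement is the Claim_ definition above) =====
theorem generate_sectioned_spec : Claim_equal_generate_sectioned := by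
  intro n _
  unfold Spec_generate_sectioned
  simp only [generate_sectioned, generate_sectioned_alt]
  by_cases hn : 0 ≤ n
  · obtain ⟨N, rfl⟩ : ∃ N : ℕ, (N : Int) = n := ⟨n.toNat, Int.toNat_of_nonneg hn⟩
    rw [pvA_parts, pvB_sections, pvJoin_final]
  · have hA : PySem.List.pyRange 0 n 1 = [] :=
      PySem.List.pyRange_one_eq_nil (by omega)
    have hB : PySem.List.pyRange 0 (-(PySem.Int.floordiv (-n) 20)) 1 = [] := by
      apply PySem.List.pyRange_one_eq_nil
      rw [PySem.Int.floordiv_eq_ediv_of_pos (by norm_num)]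
      omega
    rw [hA, hB]
    rfl
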